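-- pv_equiv track=rewrite | github.com/jsm512/programmers_python | 등차수열의 특정한 항만 더하기.py | solution
-- ===== SOURCE A (Python) =====
-- def solution(a, d, included):
--     answer = 0
--     tmp = []
--     #첫번째 항부터 마지막 항까지 수열 ex) [3,7,11,15,19]
--     for i in range(len(included)):
--         tmp.append(a + (d * i))
--     #included배열에서 True인 idx번호를 가져와 tmp에서 사용 T값만 sum
--     for idx, val in enumerate(included):
--         if val:
--             answer += tmp[idx]
--     return answer
-- ===== SOURCE B (Python) =====
-- def solution(a, d, included):
--     c = 0
--     s = 0
--     for i, v in enumerate(included):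
--         if v:
--             c += 1
--             s += i
--     return a * c + d * s
-- ===== Notes on version B (the rewrite author's own statement) =====
-- stated objective: simpler
-- what changed: B builds no intermediate term list: one pass keeps only a count of True entries and the sum of their indices, returning the algebraic closed form a*c + d*s.
import Mathlib
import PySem

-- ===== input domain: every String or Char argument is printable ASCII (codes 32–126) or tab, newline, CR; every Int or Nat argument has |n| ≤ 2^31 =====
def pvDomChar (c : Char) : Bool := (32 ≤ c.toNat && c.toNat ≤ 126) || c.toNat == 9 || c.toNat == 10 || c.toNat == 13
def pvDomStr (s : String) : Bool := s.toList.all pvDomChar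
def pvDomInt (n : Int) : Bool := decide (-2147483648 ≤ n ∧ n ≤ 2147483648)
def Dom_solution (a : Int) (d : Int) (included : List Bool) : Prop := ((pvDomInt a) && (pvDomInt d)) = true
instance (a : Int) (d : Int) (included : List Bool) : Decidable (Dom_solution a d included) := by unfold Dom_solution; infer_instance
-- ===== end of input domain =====

-- B replaces A's build-term-list-then-select-sum by a single pass keeping a True-count and an
-- index-sum, returning the closed form a*c + d*s (objective: simpler, O(1) extra space).

-- ===== PORT A =====
def solution (a : Int) (d : Int) (included : List Bool) : Int :=
  -- tmp: for i in range(len(included)): tmp.append(a + d*i)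
  let tmp : List Int :=
    (PySem.List.pyRange 0 (included.length : Int) 1).foldl (fun t i => t ++ [a + d * i]) []
  -- for idx, val in enumerate(included): if val: answer += tmp[idx]
  -- tmp[idx] ported as pyGetD with default 0: exact, since idx is always in range (len tmp = len included)
  (PySem.List.enumerate included 0).foldl
    (fun answer p => if p.2 then answer + PySem.List.pyGetD tmp p.1 0 else answer) 0

-- ===== PORT B =====
def solution_alt (a : Int) (d : Int) (included : List Bool) : Int :=
  let cs : Int × Int :=
    (PySem.List.enumerate included 0).foldl
      (fun cs p => if p.2 then (cs.1 + 1, cs.2 + p.1) else cs) (0, 0)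
  a * cs.1 + d * cs.2

-- ===== PRECONDITION & SPEC =====
def Spec_solution (a : Int) (d : Int) (included : List Bool) (out : Int) : Prop := out = solution_alt a d included
instance (a : Int) (d : Int) (included : List Bool) (out : Int) : Decidable (Spec_solution a d included out) := by unfold Spec_solution; infer_instance

-- ===== CLAIM (what is proved, stated in full; the proofs are below) =====
def Claim_equal_solution : Prop := ∀ (a : Int) (d : Int) (included : List Bool), Dom_solution a d included → Spec_solution a d included (solution a d included)

-- ===== LEMMAS AND PROOFS =====

-- Both folds, run from compatible accumulators, agree: A's running answer equals a*c + d*s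
-- for B's running (c, s).
theorem key_fold (a d : Int) (xs : List Bool) : ∀ (s c t : Int),
    (PySem.List.enumerate xs s).foldl
      (fun answer p => if p.2 then answer + (a + d * p.1) else answer) (a * c + d * t)
    = (fun cs : Int × Int => a * cs.1 + d * cs.2)
        ((PySem.List.enumerate xs s).foldl
          (fun cs p => if p.2 then (cs.1 + 1, cs.2 + p.1) else cs) (c, t)) := by
  induction xs with
  | nil => intro s c t; simp [PySem.List.enumerate_nil]
  | cons x xs ih =>
    intro s c t
    rw [PySem.List.enumerate_cons]
    simp only [List.foldl_cons]
    cases x with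
    | false => simpa using ih (s + 1) c t
    | true =>
      have : a * c + d * t + (a + d * s) = a * (c + 1) + d * (t + s) := by ring
      rw [this]
      simpa using ih (s + 1) (c + 1) (t + s)

theorem solution_spec : Claim_equal_solution := by
  intro a d included _
  unfold Spec_solution solution solution_alt
  simp only
  have hcongr :
      (PySem.List.enumerate included 0).foldl
        (fun answer (p : Int × Bool) =>
          if p.2 then
            answer + PySem.List.pyGetD
              ((PySem.List.pyRange 0 (included.length : Int) 1).foldl
                (fun t i => t ++ [a + d * i]) []) p.1 0
          else answer) 0
      = (PySem.List.enumerate included 0).foldl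
          (fun answer (p : Int × Bool) => if p.2 then answer + (a + d * p.1) else answer) 0 := by
    apply PySem.List.foldl_congr_mem'
    intro p hp acc
    rcases (PySem.List.mem_enumerate_iff _ _ _).1 hp with ⟨k, hk, rfl⟩
    simp only
    rw [PySem.List.foldl_append_singleton_eq_map]
    simp only [List.nil_append]
    rw [PySem.List.pyGetD_map_pyRange_of_nonneg (fun i => a + d * i)
      (included.length : Int) ((0 : Int) + k) 0 (by positivity) (by omega)]
  rw [hcongr]
  have := key_fold a d included 0 0 0
  simpa using this
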